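-- pv_equiv track=rewrite | github.com/Albits/advent_of_code | day_12/part_1.py | get_unambiguous_values
-- ===== SOURCE A (Python) =====
-- def get_unambiguous_values(possible_values, total_size):
--     mask = 2**total_size - 1
--     unambiguous_springs = mask
--     unambiguous_dots = mask
--
--     for value in possible_values:
--         unambiguous_springs = unambiguous_springs & value
--         unambiguous_dots = unambiguous_dots & (~value & mask)
--
--     unambiguous_springs_positions = []
--     unambiguous_dots_positions = []
--
--     for i in range(len(bin(unambiguous_springs))):
--         current_index = -(i + 1)
--         if bin(unambiguous_springs)[current_index] == "1":
--             unambiguous_springs_positions.append(total_size + current_index)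
--     for i in range(len(bin(unambiguous_dots))):
--         current_index = -(i + 1)
--         if bin(unambiguous_dots)[current_index] == "1":
--             unambiguous_dots_positions.append(total_size + current_index)
--
--     return unambiguous_springs_positions, unambiguous_dots_positions
-- ===== SOURCE B (Python) =====
-- def get_unambiguous_values(possible_values, total_size):
--     mask = 2**total_size - 1
--     springs = mask
--     dots = mask
--     for value in possible_values:
--         springs &= value
--         dots &= ~value & mask
--     def bit_positions(v):
--         # walk only the value's bits arithmetically (no bin() strings),
--         # tracking the recorded position directly
--         out = []
--         i = total_size - 1
--         while v > 0:
--             if v & 1: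
--                 out.append(i)
--             v >>= 1
--             i -= 1
--         return out
--     return bit_positions(springs), bit_positions(dots)
-- ===== Notes on version B (the rewrite author's own statement) =====
-- stated objective: faster
-- what changed: B keeps A's running-AND loop but replaces A's position scans — which rebuild the bin() string and index it from the end for every i in range(len(bin(v))) — with a single arithmetic walk over the accumulator's bits (v & 1 test, v >>= 1), tracking the recorded position directly.
import Mathlib
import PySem

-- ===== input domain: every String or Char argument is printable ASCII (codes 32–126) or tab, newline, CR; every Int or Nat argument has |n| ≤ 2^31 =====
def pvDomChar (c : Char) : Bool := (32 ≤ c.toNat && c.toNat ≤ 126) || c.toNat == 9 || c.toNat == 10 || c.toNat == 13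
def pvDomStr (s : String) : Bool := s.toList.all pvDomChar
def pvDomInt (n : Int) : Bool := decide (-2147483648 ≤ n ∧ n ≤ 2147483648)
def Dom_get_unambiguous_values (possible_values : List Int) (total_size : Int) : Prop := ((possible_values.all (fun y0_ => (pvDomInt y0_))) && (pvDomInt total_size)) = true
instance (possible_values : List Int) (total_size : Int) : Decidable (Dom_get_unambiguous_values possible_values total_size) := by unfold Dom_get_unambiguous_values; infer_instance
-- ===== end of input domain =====

-- B replaces A's bin()-string scans (bin() rebuilt and indexed from the end at every position)
-- by one arithmetic walk over the accumulator's bits; same running-AND loop, same results;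
-- intended as faster (a timing run measured B ahead at large sizes).

-- ===== PORT A =====
-- A's two identical position-scan loops, as one helper applied twice:
-- for i in range(len(bin(v))): if bin(v)[-(i+1)] == "1": out.append(total_size + (-(i+1)))
def pvBinScan (v : Int) (total_size : Int) : List Int :=
  (PySem.List.pyRange 0 (PySem.Str.len (PySem.Int.pyBin v)) 1).foldl
    (fun acc i =>
      if PySem.Str.pyGet? (PySem.Int.pyBin v) (-(i + 1)) = some '1' then
        acc ++ [total_size + (-(i + 1))]
      else acc) []

def get_unambiguous_values (possible_values : List Int) (total_size : Int) : List Int × List Int :=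
  -- mask = 2**total_size - 1  (exact for 0 ≤ total_size; on a negative exponent Python makes a float and A raises — excluded by Pre_)
  let mask : Int := 2 ^ total_size.toNat - 1
  let sd := possible_values.foldl
    (fun (p : Int × Int) value =>
      (PySem.Int.band p.1 value, PySem.Int.band p.2 (PySem.Int.band (Int.not value) mask)))
    (mask, mask)
  (pvBinScan sd.1 total_size, pvBinScan sd.2 total_size)

-- ===== PORT B =====
-- Source B's bit_positions: while v > 0: if v & 1: out.append(i); v >>= 1; i -= 1
def pvBitPositions (v : Int) (i : Int) : List Int :=
  if h : 0 < v then
    (if PySem.Int.band v 1 ≠ 0 then [i] else []) ++ pvBitPositions (v >>> (1:Nat)) (i - 1)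
  else []
termination_by v.toNat
decreasing_by
  rcases v with n | n
  · have h1 : (Int.ofNat n) >>> (1:Nat) = ((n / 2 : Nat) : Int) := by
      rw [show (Int.ofNat n) >>> (1:Nat) = Int.ofNat (n >>> 1) from rfl, Nat.shiftRight_one]; rfl
    rw [h1]; simp only [Int.ofNat_eq_natCast] at *; omega
  · exact absurd h (by omega)

def get_unambiguous_values_alt (possible_values : List Int) (total_size : Int) : List Int × List Int :=
  let mask : Int := 2 ^ total_size.toNat - 1
  let sd := possible_values.foldl
    (fun (p : Int × Int) value =>
      (PySem.Int.band p.1 value, PySem.Int.band p.2 (PySem.Int.band (Int.not value) mask)))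
    (mask, mask)
  (pvBitPositions sd.1 (total_size - 1), pvBitPositions sd.2 (total_size - 1))

-- ===== PRECONDITION & SPEC =====
-- Pre_ excludes total_size < 0, where Python's 2**total_size is a float and A raises TypeError at '&' (B raises identically).
def Pre_get_unambiguous_values (possible_values : List Int) (total_size : Int) : Prop :=
  0 ≤ total_size
instance (possible_values : List Int) (total_size : Int) : Decidable (Pre_get_unambiguous_values possible_values total_size) := by unfold Pre_get_unambiguous_values; infer_instance

def pvWitness_get_unambiguous_values : List Int × Int := ([5, 7], 3)

def Spec_get_unambiguous_values (possible_values : List Int) (total_size : Int) (out : List Int × List Int) : Prop := out = get_unambiguous_values_alt possible_values total_size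
instance (possible_values : List Int) (total_size : Int) (out : List Int × List Int) : Decidable (Spec_get_unambiguous_values possible_values total_size out) := by unfold Spec_get_unambiguous_values; infer_instance

-- ===== CLAIM (what is proved, stated in full; the proofs are below) =====
def Claim_equal_get_unambiguous_values : Prop := ∀ (possible_values : List Int) (total_size : Int), Dom_get_unambiguous_values possible_values total_size → Pre_get_unambiguous_values possible_values total_size → Spec_get_unambiguous_values possible_values total_size (get_unambiguous_values possible_values total_size)

-- ===== LEMMAS AND PROOFS =====

-- canonical LSB-first binary digit characters of m (always at least one digit)
def pvLsbChars (m : Nat) : List Char :=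
  (m % 2).digitChar :: (if _h : m / 2 = 0 then [] else pvLsbChars (m / 2))
termination_by m
decreasing_by exact Nat.div_lt_self (by omega) (by omega)

-- canonical LSB-first positions of the set bits, starting at position p and descending
def pvPosNat (m : Nat) (p : Int) : List Int :=
  if _h : m = 0 then []
  else (if m % 2 = 1 then [p] else []) ++ pvPosNat (m / 2) (p - 1)
termination_by m
decreasing_by exact Nat.div_lt_self (by omega) (by omega)

-- scan a char list front-to-back, recording descending positions at '1's
def pvScanIdx (r : List Char) (p : Int) : List Int :=
  match r with
  | [] => []
  | c :: cs => (if c = '1' then [p] else []) ++ pvScanIdx cs (p - 1)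

theorem pvToDigitsCore_eq (fuel : Nat) : ∀ (m : Nat) (ds : List Char), m < fuel →
    Nat.toDigitsCore 2 fuel m ds = (pvLsbChars m).reverse ++ ds := by
  induction fuel with
  | zero => intro m ds h; omega
  | succ f ih =>
    intro m ds h
    rw [Nat.toDigitsCore]
    by_cases h2 : m / 2 = 0
    · rw [pvLsbChars]; simp [h2]
    · have hlt : m / 2 < f := by omega
      simp only [h2, if_false]
      rw [ih (m / 2) _ hlt]
      conv_rhs => rw [pvLsbChars, dif_neg h2]
      simp

theorem pvToDigits_eq (m : Nat) : Nat.toDigits 2 m = (pvLsbChars m).reverse := by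
  rw [Nat.toDigits, pvToDigitsCore_eq (m + 1) m [] (by omega), List.append_nil]

theorem pvScanIdx_append (xs ys : List Char) (p : Int) :
    pvScanIdx (xs ++ ys) p = pvScanIdx xs p ++ pvScanIdx ys (p - xs.length) := by
  induction xs generalizing p with
  | nil => simp [pvScanIdx]
  | cons c cs ih =>
    simp only [List.cons_append, pvScanIdx, ih (p - 1), List.append_assoc, List.length_cons]
    congr 3
    push_cast
    ring

theorem pvScanIdx_eq_posNat (m : Nat) (p : Int) : pvScanIdx (pvLsbChars m) p = pvPosNat m p := by
  induction m using Nat.strong_induction_on generalizing p with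
  | _ m ih =>
    rw [pvLsbChars, pvPosNat]
    by_cases h0 : m = 0
    · subst h0; simp only [pvScanIdx]; simp; exact ⟨by decide, rfl⟩
    · rw [dif_neg h0]
      by_cases h2 : m / 2 = 0
      · rw [dif_pos h2, h2, pvPosNat]
        simp only [pvScanIdx, List.append_nil]
        rcases Nat.mod_two_eq_zero_or_one m with h | h <;> simp [h, Nat.digitChar]
      · rw [dif_neg h2]
        simp only [pvScanIdx]
        rw [ih (m / 2) (Nat.div_lt_self (by omega) (by omega)) (p - 1)]
        congr 1
        rcases Nat.mod_two_eq_zero_or_one m with h | h <;> simp [h, Nat.digitChar]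

-- B side: pvBitPositions on a natural number is pvPosNat
theorem pvBitPositions_eq_posNat (m : Nat) (p : Int) : pvBitPositions (m : Int) p = pvPosNat m p := by
  induction m using Nat.strong_induction_on generalizing p with
  | _ m ih =>
    rw [pvBitPositions, pvPosNat]
    by_cases h0 : m = 0
    · subst h0; simp
    · rw [dif_pos (by exact_mod_cast Nat.pos_of_ne_zero h0), dif_neg h0]
      have hsh : ((m : Int) >>> (1 : Nat)) = ((m / 2 : Nat) : Int) := by
        rw [show ((m:Int)) >>> (1:Nat) = Int.ofNat (m >>> 1) from rfl, Nat.shiftRight_one]; rfl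
      
      rw [hsh, ih (m / 2) (Nat.div_lt_self (by omega) (by omega)) (p - 1)]
      congr 1
      have hband : PySem.Int.band (m : Int) 1 = ((m &&& 1 : Nat) : Int) := by
        exact_mod_cast PySem.Int.band_natCast m 1
      rw [hband, Nat.and_one_is_mod]
      rcases Nat.mod_two_eq_zero_or_one m with h | h <;> simp [h]

-- the range-index foldl of A's scan over a reversed char list
theorem pvFoldl_scan (r : List Char) (ts : Int) (acc : List Int) :
    (List.range r.length).foldl
      (fun acc (i : Nat) => if r[i]? = some '1' then acc ++ [ts - 1 - (i : Int)] else acc) acc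
    = acc ++ pvScanIdx r (ts - 1) := by
  induction r generalizing ts acc with
  | nil => simp [pvScanIdx]
  | cons c cs ih =>
    rw [List.length_cons, List.range_succ_eq_map, List.foldl_cons, List.foldl_map]
    have hmain : ∀ acc' : List Int, List.foldl
        (fun acc (i : Nat) => if (c :: cs)[i.succ]? = some '1' then acc ++ [ts - 1 - (i.succ : Int)] else acc)
        acc' (List.range cs.length)
        = acc' ++ pvScanIdx cs (ts - 1 - 1) := by
      intro acc'
      have hcg := PySem.List.foldl_congr_mem (List.range cs.length)
        (fun acc (i : Nat) => if (c :: cs)[i.succ]? = some '1' then acc ++ [ts - 1 - (i.succ : Int)] else acc)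
        (fun acc (i : Nat) => if cs[i]? = some '1' then acc ++ [(ts - 1) - 1 - (i : Int)] else acc) acc'
        (by
          intro a x _
          simp only [List.getElem?_cons_succ]
          congr 2
          push_cast
          ring)
      rw [hcg]
      exact ih (ts - 1) acc'
    rw [hmain]
    simp only [List.getElem?_cons_zero, pvScanIdx]
    by_cases hc : c = '1' <;> simp [hc]

-- A side: the whole bin()-string scan equals B's bit walk, for nonnegative values
theorem pvBinScan_eq (m : Nat) (ts : Int) :
    pvBinScan (m : Int) ts = pvBitPositions (m : Int) (ts - 1) := by
  rw [pvBitPositions_eq_posNat, ← pvScanIdx_eq_posNat]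
  unfold pvBinScan
  have hchars : (PySem.Int.pyBin (m : Int)).toList = '0' :: 'b' :: (pvLsbChars m).reverse := by
    rw [PySem.Int.toList_pyBin, PySem.Int.toBinChars0b]
    rw [if_neg (by omega)]
    simp [pvToDigits_eq]
  have hlen : PySem.Str.len (PySem.Int.pyBin (m : Int)) =
      (((PySem.Int.pyBin (m : Int)).toList.length : Nat) : Int) := PySem.Str.len_eq _
  rw [hlen, PySem.List.pyRange_zero_nat, List.foldl_map]
  set L := (PySem.Int.pyBin (m : Int)).toList with hL
  have hget : ∀ (i : Nat), i < L.length →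
      PySem.Str.pyGet? (PySem.Int.pyBin (m : Int)) (-((i : Int) + 1)) = L.reverse[i]? := by
    intro i hi
    have : PySem.Str.pyGet? (PySem.Int.pyBin (m : Int)) (-((i : Int) + 1))
        = PySem.List.pyGet? L (-((i + 1 : Nat) : Int)) := by
      rw [show PySem.Str.pyGet? (PySem.Int.pyBin (m : Int)) = PySem.List.pyGet? L from rfl]
      norm_num
    rw [this, PySem.List.pyGet?_neg_natCast L (i + 1) (by omega) (by omega),
      List.getElem?_reverse hi]
    congr 1
    omega
  have hfold : (List.range L.length).foldl
      (fun acc (i : Nat) => if PySem.Str.pyGet? (PySem.Int.pyBin (m : Int)) (-((i : Int) + 1)) = some '1'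
        then acc ++ [ts + (-((i : Int) + 1))] else acc) []
      = (List.range L.length).foldl
      (fun acc (i : Nat) => if L.reverse[i]? = some '1' then acc ++ [ts - 1 - (i : Int)] else acc) [] := by
    apply PySem.List.foldl_congr_mem
    intro a i hi
    rw [hget i (by simpa using List.mem_range.mp hi)]
    congr 2
    ring
  have hrl : L.length = L.reverse.length := (List.length_reverse).symm
  rw [hfold, hrl, pvFoldl_scan, List.nil_append]
  rw [show L.reverse = pvLsbChars m ++ ['b', '0'] by rw [hchars]; simp]
  rw [pvScanIdx_append]
  simp [pvScanIdx]

theorem pvFold_nonneg (possible_values : List Int) (mask : Int) (init : Int × Int)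
    (h1 : 0 ≤ init.1) (h2 : 0 ≤ init.2) :
    0 ≤ (possible_values.foldl
      (fun (p : Int × Int) value =>
        (PySem.Int.band p.1 value, PySem.Int.band p.2 (PySem.Int.band (Int.not value) mask)))
      init).1 ∧
    0 ≤ (possible_values.foldl
      (fun (p : Int × Int) value =>
        (PySem.Int.band p.1 value, PySem.Int.band p.2 (PySem.Int.band (Int.not value) mask)))
      init).2 := by
  induction possible_values generalizing init with
  | nil => exact ⟨h1, h2⟩
  | cons v vs ih =>
    exact ih _ (PySem.Int.band_nonneg_of_nonneg_left _ h1) (PySem.Int.band_nonneg_of_nonneg_left _ h2)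

-- ===== VERDICT (by name: the statement is the Claim_ definition above) =====
theorem get_unambiguous_values_spec : Claim_equal_get_unambiguous_values := by
  intro possible_values total_size _ hpre
  unfold Spec_get_unambiguous_values get_unambiguous_values get_unambiguous_values_alt
  have hm : (0:Int) ≤ 2 ^ total_size.toNat - 1 := by
    have h1 : (1:Int) ≤ 2 ^ total_size.toNat := one_le_pow₀ (by omega)
    linarith
  obtain ⟨hn1, hn2⟩ := pvFold_nonneg possible_values (2 ^ total_size.toNat - 1)
    (2 ^ total_size.toNat - 1, 2 ^ total_size.toNat - 1) hm hm
  have key : ∀ v : Int, 0 ≤ v → pvBinScan v total_size = pvBitPositions v (total_size - 1) := by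
    intro v hv
    have := pvBinScan_eq v.toNat total_size
    rwa [Int.toNat_of_nonneg hv] at this
  exact Prod.ext (key _ hn1) (key _ hn2)
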